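-- pv_equiv track=rewrite | github.com/almala333/EEBE-problemas-Jutge-Q1-24-25 | 05_Iteraciones while/X78066_Fracción continua mcd.py | fraccion_continua_mcd
-- ===== SOURCE A (Python) =====
-- def fraccion_continua_mcd(n, m):
--     '''
--     Paràmetres
--     ----------
--     n: int
--         El primer nombre enter, que representa el numerador.
--     m: int
--         El segon nombre enter, que representa el denominador.
--
--     Retorna
--     -------
--     tuple
--         Una tupla que conté tres llistes:
--         - La primera llista conté els quocients de la fracció contínua.
--         - La segona llista conté els numeradors de les fraccions parcials.
--         - La tercera llista conté els denominadors de les fraccions parcials.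
--
--     Tests públics
--     -------------
--     >>> fraccion_continua_mcd(972, 421)
--     ([2, 3, 4, 5, 6], [2, 7, 30, 157, 972], [1, 3, 13, 68, 421])
--     >>> fraccion_continua_mcd(98, 35)
--     ([2, 1, 28], [2, 3, 98], [1, 1, 35])
--     >>> fraccion_continua_mcd(98, 34)
--     ([2, 1, 7, 4], [2, 3, 23, 98], [1, 1, 8, 34])
--
--     Tests privats
--     -------------
--     >>> fraccion_continua_mcd(10, 2)
--     ([10], [10], [2])
--     >>> fraccion_continua_mcd(15, 5)
--     ([15], [15], [5])
--     >>> fraccion_continua_mcd(100, 75)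
--     ([1, 75], [1, 100], [1, 75])
--
--     '''
--     q = []
--     P = [0, 1]
--     Q = [1, 0]
--     a, b = n, m
--
--     while a % b != 0:
--         q.append(a // b)
--         a, b = b, a % b
--         P.append(q[-1] * P[-1] + P[-2])
--         Q.append(q[-1] * Q[-1] + Q[-2])
--     q.append(a)
--     P.append(n)
--     Q.append(m)
--     return (q, P[2:], Q[2:])
-- ===== SOURCE B (Python) =====
-- def fraccion_continua_mcd(n, m):
--     def quots(a, b):
--         # recursive Euclid: quotient list, with the raw final a as last entry
--         if a % b == 0:
--             return [a]
--         return [a // b] + quots(b, a % b)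
--
--     def conv(pref):
--         # evaluate the continued fraction [pref[0]; pref[1], ...] from the BACK
--         # as an integer fraction p/r: yields the continuant pair directly
--         p, r = pref[-1], 1
--         for c in reversed(pref[:-1]):
--             p, r = c * p + r, p
--         return (p, r)
--
--     q = quots(n, m)
--     pairs = [conv(q[:i + 1]) for i in range(len(q) - 1)]
--     return (q, [p for p, _ in pairs] + [n], [r for _, r in pairs] + [m])
-- ===== Notes on version B (the rewrite author's own statement) =====
-- stated objective: alternative
-- what changed: B collects the Euclid quotients by structural recursion and then computes each convergent independently by evaluating its quotient prefix as a fraction from the BACK (continuant identity), instead of A's single interleaved loop maintaining P/Q via the forward last-two recurrence.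
import Mathlib
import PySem

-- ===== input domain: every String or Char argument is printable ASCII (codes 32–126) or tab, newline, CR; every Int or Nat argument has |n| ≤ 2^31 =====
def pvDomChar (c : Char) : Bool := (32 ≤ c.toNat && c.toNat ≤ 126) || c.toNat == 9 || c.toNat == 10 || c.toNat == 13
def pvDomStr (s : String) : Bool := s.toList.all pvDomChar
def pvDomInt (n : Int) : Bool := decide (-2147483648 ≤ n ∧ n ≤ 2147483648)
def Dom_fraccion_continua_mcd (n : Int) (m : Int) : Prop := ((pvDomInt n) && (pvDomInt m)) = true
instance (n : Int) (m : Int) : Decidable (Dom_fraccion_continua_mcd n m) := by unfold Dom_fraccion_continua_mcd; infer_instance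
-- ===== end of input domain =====

-- B replaces A's single interleaved loop (Euclid + forward last-two recurrence on P/Q) by a
-- recursive Euclid producing the quotient list and an independent BACKWARD evaluation of each
-- quotient prefix as an integer fraction (continuant identity); same results, different algorithm.
-- Both Pythons raise ZeroDivisionError exactly when m = 0, which Pre_ excludes.

-- b strictly shrinks in absolute value at each Euclid step (used by both ports' termination).
theorem pvModNatAbsLt (a b : Int) (hb : b ≠ 0) : (PySem.Int.mod a b).natAbs < b.natAbs := by
  rcases lt_or_gt_of_ne hb with h | h
  · have h1 := PySem.Int.mod_neg_bounds a h
    omega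
  · have h1 := PySem.Int.mod_nonneg a h
    have h2 := PySem.Int.mod_lt a h
    omega

-- ===== PORT A =====
-- A's while-loop: state (a, b, q, P, Q); q[-1]*P[-1]+P[-2] via pyGet? (lists always have ≥ 2 elements).
def fcLoopA (a b : Int) (q P Q : List Int) : List Int × List Int × List Int × Int :=
  if hb : b = 0 then (q, P, Q, a)   -- guard: Python raises here (excluded by Pre_); never reached after entry
  else if PySem.Int.mod a b = 0 then (q, P, Q, a)
  else
    let c := PySem.Int.floordiv a b
    fcLoopA b (PySem.Int.mod a b) (q ++ [c])
      (P ++ [c * (PySem.List.pyGet? P (-1)).getD 0 + (PySem.List.pyGet? P (-2)).getD 0])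
      (Q ++ [c * (PySem.List.pyGet? Q (-1)).getD 0 + (PySem.List.pyGet? Q (-2)).getD 0])
termination_by b.natAbs
decreasing_by exact pvModNatAbsLt a b hb

def fraccion_continua_mcd (n : Int) (m : Int) : List Int × List Int × List Int :=
  let r := fcLoopA n m [] [0, 1] [1, 0]
  (r.1 ++ [r.2.2.2],
   PySem.List.slice (r.2.1 ++ [n]) (some 2) none,
   PySem.List.slice (r.2.2.1 ++ [m]) (some 2) none)

-- ===== PORT B =====
-- B's quots: recursive Euclid collecting the quotient list, raw final a last.
def fcQuots (a b : Int) : List Int :=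
  if hb : b = 0 then [a]   -- guard: Python raises here (excluded by Pre_); never reached after entry
  else if PySem.Int.mod a b = 0 then [a]
  else [PySem.Int.floordiv a b] ++ fcQuots b (PySem.Int.mod a b)
termination_by b.natAbs
decreasing_by exact pvModNatAbsLt a b hb

-- B's loop body in conv: p, r = c*p + r, p.
def fcCStep (pr : Int × Int) (c : Int) : Int × Int := (c * pr.1 + pr.2, pr.1)

-- B's conv: evaluate pref from the back, starting at (pref[-1], 1), folding over reversed(pref[:-1]).
def fcConv (pref : List Int) : Int × Int :=
  ((PySem.List.slice pref none (some (-1))).reverse).foldl fcCStep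
    ((PySem.List.pyGet? pref (-1)).getD 0, 1)

def fraccion_continua_mcd_alt (n : Int) (m : Int) : List Int × List Int × List Int :=
  let q := fcQuots n m
  let pairs := (PySem.List.pyRange 0 ((q.length : Int) - 1) 1).map
    (fun i => fcConv (PySem.List.slice q none (some (i + 1))))
  (q, pairs.map Prod.fst ++ [n], pairs.map Prod.snd ++ [m])

-- ===== PRECONDITION & SPEC =====
-- Pre_ excludes exactly m = 0, where Python A raises ZeroDivisionError (so does B).
def Pre_fraccion_continua_mcd (n : Int) (m : Int) : Prop := m ≠ 0
instance (n : Int) (m : Int) : Decidable (Pre_fraccion_continua_mcd n m) := by unfold Pre_fraccion_continua_mcd; infer_instance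
def pvWitness_fraccion_continua_mcd : Int × Int := (972, 421)

def Spec_fraccion_continua_mcd (n : Int) (m : Int) (out : List Int × List Int × List Int) : Prop := out = fraccion_continua_mcd_alt n m
instance (n : Int) (m : Int) (out : List Int × List Int × List Int) : Decidable (Spec_fraccion_continua_mcd n m out) := by unfold Spec_fraccion_continua_mcd; infer_instance

-- ===== CLAIM (what is proved, stated in full; the proofs are below) =====
def Claim_equal_fraccion_continua_mcd : Prop := ∀ (n : Int) (m : Int), Dom_fraccion_continua_mcd n m → Pre_fraccion_continua_mcd n m → Spec_fraccion_continua_mcd n m (fraccion_continua_mcd n m)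

-- ===== LEMMAS AND PROOFS =====

-- Proof-side view of A's loop split into Euclid (quotients only) + a fold; used only below.
def fcEuclid (a b : Int) (q : List Int) : List Int × Int :=
  if hb : b = 0 then (q, a)
  else if PySem.Int.mod a b = 0 then (q, a)
  else fcEuclid b (PySem.Int.mod a b) (q ++ [PySem.Int.floordiv a b])
termination_by b.natAbs
decreasing_by exact pvModNatAbsLt a b hb

-- A's loop body, as a function of the two lists' last two elements appended.
def fcStep (PQ : List Int × List Int) (c : Int) : List Int × List Int :=
  (PQ.1 ++ [c * (PySem.List.pyGet? PQ.1 (-1)).getD 0 + (PySem.List.pyGet? PQ.1 (-2)).getD 0],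
   PQ.2 ++ [c * (PySem.List.pyGet? PQ.2 (-1)).getD 0 + (PySem.List.pyGet? PQ.2 (-2)).getD 0])

theorem fcEuclid_step (a b : Int) (hb : b ≠ 0) (hm : PySem.Int.mod a b ≠ 0) (q : List Int) :
    fcEuclid a b q = fcEuclid b (PySem.Int.mod a b) (q ++ [PySem.Int.floordiv a b]) := by
  conv_lhs => rw [fcEuclid]
  simp [hb, hm]

theorem fcEuclid_base (a b : Int) (hm : PySem.Int.mod a b = 0 ∨ b = 0) (q : List Int) :
    fcEuclid a b q = (q, a) := by
  rw [fcEuclid]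
  rcases hm with hm | hb
  · by_cases hb : b = 0 <;> simp [hb, hm]
  · simp [hb]

theorem fcLoopA_step (a b : Int) (hb : b ≠ 0) (hm : PySem.Int.mod a b ≠ 0) (q P Q : List Int) :
    fcLoopA a b q P Q = fcLoopA b (PySem.Int.mod a b) (q ++ [PySem.Int.floordiv a b])
      (fcStep (P, Q) (PySem.Int.floordiv a b)).1 (fcStep (P, Q) (PySem.Int.floordiv a b)).2 := by
  conv_lhs => rw [fcLoopA]
  simp [hb, hm, fcStep]

theorem fcEuclid_acc (k : Nat) : ∀ (a b : Int), b.natAbs = k → ∀ q : List Int,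
    fcEuclid a b q = (q ++ (fcEuclid a b []).1, (fcEuclid a b []).2) := by
  induction k using Nat.strong_induction_on with
  | _ k ih =>
    intro a b hk q
    by_cases hb : b = 0
    · rw [fcEuclid_base a b (Or.inr hb) q, fcEuclid_base a b (Or.inr hb) []]; simp
    · by_cases hm : PySem.Int.mod a b = 0
      · rw [fcEuclid_base a b (Or.inl hm) q, fcEuclid_base a b (Or.inl hm) []]; simp
      · rw [fcEuclid_step a b hb hm q, fcEuclid_step a b hb hm [],
            ih (PySem.Int.mod a b).natAbs (hk ▸ pvModNatAbsLt a b hb) b (PySem.Int.mod a b) rfl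
              (q ++ [PySem.Int.floordiv a b]),
            ih (PySem.Int.mod a b).natAbs (hk ▸ pvModNatAbsLt a b hb) b (PySem.Int.mod a b) rfl
              ([] ++ [PySem.Int.floordiv a b])]
        simp

-- A's interleaved loop = Euclid quotients, then a fold of fcStep over them.
theorem fcLoopA_eq (k : Nat) : ∀ (a b : Int), b.natAbs = k → b ≠ 0 → ∀ q P Q : List Int,
    fcLoopA a b q P Q =
      (q ++ (fcEuclid a b []).1,
       ((fcEuclid a b []).1.foldl fcStep (P, Q)).1,
       ((fcEuclid a b []).1.foldl fcStep (P, Q)).2,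
       (fcEuclid a b []).2) := by
  induction k using Nat.strong_induction_on with
  | _ k ih =>
    intro a b hk hb q P Q
    by_cases hm : PySem.Int.mod a b = 0
    · rw [fcEuclid_base a b (Or.inl hm) []]
      rw [fcLoopA]
      simp [hb, hm]
    · rw [fcLoopA_step a b hb hm q P Q,
          ih (PySem.Int.mod a b).natAbs (hk ▸ pvModNatAbsLt a b hb) b (PySem.Int.mod a b) rfl hm,
          fcEuclid_step a b hb hm [],
          fcEuclid_acc (PySem.Int.mod a b).natAbs b (PySem.Int.mod a b) rfl
            ([] ++ [PySem.Int.floordiv a b])]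
      simp

-- B's quotient list = A's Euclid quotients with the raw final a appended.
theorem fcQuots_eq (k : Nat) : ∀ (a b : Int), b.natAbs = k →
    fcQuots a b = (fcEuclid a b []).1 ++ [(fcEuclid a b []).2] := by
  induction k using Nat.strong_induction_on with
  | _ k ih =>
    intro a b hk
    by_cases hb : b = 0
    · rw [fcEuclid_base a b (Or.inr hb) [], fcQuots]; simp [hb]
    · by_cases hm : PySem.Int.mod a b = 0
      · rw [fcEuclid_base a b (Or.inl hm) [], fcQuots]; simp [hb, hm]
      · rw [fcQuots, fcEuclid_step a b hb hm [],
            fcEuclid_acc (PySem.Int.mod a b).natAbs b (PySem.Int.mod a b) rfl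
              ([] ++ [PySem.Int.floordiv a b]),
            ih (PySem.Int.mod a b).natAbs (hk ▸ pvModNatAbsLt a b hb) b (PySem.Int.mod a b) rfl]
        simp [hb, hm]

-- The scan of fcCStep first components, as a list (used to characterise A's fold).
def cList : List Int → Int × Int → List Int
  | [], _ => []
  | c :: l, s => (fcCStep s c).1 :: cList l (fcCStep s c)

theorem pyGet_last2_snd (P : List Int) (p0 p1 : Int) :
    (PySem.List.pyGet? (P ++ [p0, p1]) (-2)).getD 0 = p0 := by
  rw [PySem.List.pyGet?_neg_ofNat (P ++ [p0, p1]) 2 (by omega) (by simp)]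
  simp

theorem pyGet_last2_fst (P : List Int) (p0 p1 : Int) :
    (PySem.List.pyGet? (P ++ [p0, p1]) (-1)).getD 0 = p1 := by
  have h1 : (P ++ [p0, p1]) = (P ++ [p0]) ++ [p1] := by simp
  rw [h1, PySem.List.pyGet?_neg_one_append_singleton]
  rfl

theorem fcStep_last2 (P Q : List Int) (p0 p1 q0 q1 c : Int) :
    fcStep (P ++ [p0, p1], Q ++ [q0, q1]) c =
      (P ++ [p0, p1] ++ [(fcCStep (p1, p0) c).1], Q ++ [q0, q1] ++ [(fcCStep (q1, q0) c).1]) := by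
  simp only [fcStep, fcCStep, pyGet_last2_snd, pyGet_last2_fst]

-- A's fold of fcStep appends the cList scan to both lists.
theorem foldl_fcStep_eq : ∀ (l P Q : List Int) (p0 p1 q0 q1 : Int),
    l.foldl fcStep (P ++ [p0, p1], Q ++ [q0, q1]) =
      ((P ++ [p0, p1]) ++ cList l (p1, p0), (Q ++ [q0, q1]) ++ cList l (q1, q0)) := by
  intro l
  induction l with
  | nil => intro P Q p0 p1 q0 q1; simp [cList]
  | cons c l ih =>
    intro P Q p0 p1 q0 q1
    rw [List.foldl_cons, fcStep_last2]
    have h1 : P ++ [p0, p1] ++ [(fcCStep (p1, p0) c).1]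
        = (P ++ [p0]) ++ [p1, (fcCStep (p1, p0) c).1] := by simp
    have h2 : Q ++ [q0, q1] ++ [(fcCStep (q1, q0) c).1]
        = (Q ++ [q0]) ++ [q1, (fcCStep (q1, q0) c).1] := by simp
    rw [h1, h2, ih]
    simp [cList, fcCStep]

-- cList entries are the first components of the prefix folds.
theorem cList_eq_map : ∀ (l : List Int) (s : Int × Int),
    cList l s = (List.range l.length).map (fun i => ((l.take (i + 1)).foldl fcCStep s).1) := by
  intro l
  induction l with
  | nil => intro s; simp [cList]
  | cons c l ih =>
    intro s
    rw [cList, ih (fcCStep s c)]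
    rw [List.length_cons, List.range_succ_eq_map, List.map_cons, List.map_map]
    congr 1

-- fcCStep folds are linear in the starting state.
theorem cstep_lin : ∀ (l : List Int) (a b p1 r1 p2 r2 : Int),
    l.foldl fcCStep (a * p1 + b * p2, a * r1 + b * r2)
      = (a * (l.foldl fcCStep (p1, r1)).1 + b * (l.foldl fcCStep (p2, r2)).1,
         a * (l.foldl fcCStep (p1, r1)).2 + b * (l.foldl fcCStep (p2, r2)).2) := by
  intro l
  induction l with
  | nil => intro a b p1 r1 p2 r2; rfl
  | cons c l ih =>
    intro a b p1 r1 p2 r2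
    simp only [List.foldl_cons]
    have h : fcCStep (a * p1 + b * p2, a * r1 + b * r2) c
        = (a * (c * p1 + r1) + b * (c * p2 + r2), a * p1 + b * p2) := by
      simp [fcCStep]; ring
    rw [h, ih a b (c * p1 + r1) p1 (c * p2 + r2) p2]
    rfl

-- Continuant reversal: folding from the back packs both the (1,0)- and (0,1)-started folds.
theorem cstep_rev : ∀ l : List Int,
    l.reverse.foldl fcCStep (1, 0) = ((l.foldl fcCStep (1, 0)).1, (l.foldl fcCStep (0, 1)).1) := by
  intro l
  induction l with
  | nil => rfl
  | cons c l ih =>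
    rw [List.reverse_cons, List.foldl_append, ih]
    simp only [List.foldl_cons]
    have h1 : fcCStep (1, 0) c = (c * 1 + 1 * 0, c * 0 + 1 * 1) := by simp [fcCStep]
    have h2 : fcCStep (0, 1) c = (1, 0) := by simp [fcCStep]
    rw [h1, h2, cstep_lin]
    simp [fcCStep]

-- B's conv of a nonempty list is the fold over its reverse from (1, 0).
theorem fcConv_concat (xs : List Int) (x : Int) :
    fcConv (xs ++ [x]) = (xs ++ [x]).reverse.foldl fcCStep (1, 0) := by
  unfold fcConv
  rw [PySem.List.slice_to_neg_one, PySem.List.pyGet?_neg_one_append_singleton]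
  simp only [List.dropLast_concat, List.reverse_append, List.reverse_cons, List.reverse_nil,
    List.nil_append, List.cons_append, List.foldl_cons, Option.getD_some]
  have h : fcCStep (1, 0) x = (x, 1) := by simp [fcCStep]
  rw [h]

-- xs[2:] on a list starting with two literals drops them.
theorem slice2_drop (a b : Int) (xs : List Int) :
    PySem.List.slice (a :: b :: xs) (some 2) none = xs := by
  rw [PySem.List.slice_from _ (by omega : (0:Int) ≤ 2)]
  rfl

-- ===== VERDICT (by name: the statement is the Claim_ definition above) =====
theorem fraccion_continua_mcd_spec : Claim_equal_fraccion_continua_mcd := by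
  intro n m _ hm
  unfold Spec_fraccion_continua_mcd fraccion_continua_mcd fraccion_continua_mcd_alt
  rw [fcLoopA_eq m.natAbs n m rfl hm, fcQuots_eq m.natAbs n m rfl]
  dsimp only
  set l := (fcEuclid n m []).1 with hl
  set x := (fcEuclid n m []).2 with hx
  have hfold := foldl_fcStep_eq l [] [] 0 1 1 0
  simp only [List.nil_append] at hfold
  rw [hfold]
  have hlen : ((l ++ [x]).length : Int) - 1 = (l.length : Int) := by simp
  rw [hlen, PySem.List.pyRange_one]
  simp only [Int.sub_zero, Int.toNat_natCast]
  have hmap : ∀ p ∈ List.range l.length,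
      (fun i => fcConv (PySem.List.slice (l ++ [x]) none (some (i + 1)))) ((fun k => (0:Int) + ↑k) p)
        = (fun i => (((l.take (i + 1)).foldl fcCStep (1, 0)).1,
            ((l.take (i + 1)).foldl fcCStep (0, 1)).1)) p := by
    intro p hp
    rw [List.mem_range] at hp
    simp only [Int.zero_add]
    have hcast : ((p : Int) + 1) = ((p + 1 : Nat) : Int) := by push_cast; ring
    rw [hcast, PySem.List.slice_to_natCast]
    have htake : (l ++ [x]).take (p + 1) = l.take (p + 1) :=
      List.take_append_of_le_length hp
    rw [htake]
    have hne : l.take (p + 1) ≠ [] := by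
      have hlt : 0 < (l.take (p + 1)).length := by
        rw [List.length_take]
        omega
      exact List.ne_nil_of_length_pos hlt
    obtain ⟨ys, y, hys⟩ := (l.take (p + 1)).eq_nil_or_concat.resolve_left hne
    rw [List.concat_eq_append] at hys
    rw [hys, fcConv_concat, ← hys, cstep_rev]
  have hcomp : ((List.range l.length).map (fun k => (0:Int) + ↑k)).map
        (fun i => fcConv (PySem.List.slice (l ++ [x]) none (some (i + 1))))
      = (List.range l.length).map (fun i => (((l.take (i + 1)).foldl fcCStep (1, 0)).1,
          ((l.take (i + 1)).foldl fcCStep (0, 1)).1)) := by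
    rw [List.map_map]
    exact List.map_congr_left hmap
  rw [hcomp]
  have hP : PySem.List.slice ([0, 1] ++ cList l (1, 0) ++ [n]) (some 2) none
      = cList l (1, 0) ++ [n] := by
    have h : ([0, 1] ++ cList l (1, 0) ++ [n] : List Int)
        = 0 :: 1 :: (cList l (1, 0) ++ [n]) := by simp
    rw [h, slice2_drop]
  have hQ : PySem.List.slice ([1, 0] ++ cList l (0, 1) ++ [m]) (some 2) none
      = cList l (0, 1) ++ [m] := by
    have h : ([1, 0] ++ cList l (0, 1) ++ [m] : List Int)
        = 1 :: 0 :: (cList l (0, 1) ++ [m]) := by simp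
    rw [h, slice2_drop]
  rw [hP, hQ]
  simp only [Prod.mk.injEq, List.nil_append, List.map_map]
  refine ⟨trivial, ?_, ?_⟩
  · rw [cList_eq_map l (1, 0)]
    rfl
  · rw [cList_eq_map l (0, 1)]
    rfl
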